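-- pv_equiv track=rewrite | github.com/oleg31947/python-selenium-automation | algorithm/HW4.py | absolute_sum
-- ===== SOURCE A (Python) =====
-- def absolute_sum(array):
--    summ = 0
--    flag = False
--    for item in array:
--       if flag == True:
--         summ += abs(item)
--       else:
--          if item < 0:
--            flag = True
--    return summ
-- ===== SOURCE B (Python) =====
-- def absolute_sum(array):
--     arr = list(array)
--     negatives = [k for k, x in enumerate(arr) if x < 0]
--     if not negatives:
--         return 0
--     i = negatives[0]
--     return sum(map(abs, arr)) - sum(map(abs, arr[:i + 1]))
-- ===== Notes on version B (the rewrite author's own statement) =====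
-- stated objective: alternative
-- what changed: Replaces A's flag-carrying accumulator loop with an arithmetic formulation: find the index of the first negative, then return the abs-sum of the whole list minus the abs-sum of the prefix through that index.
import Mathlib
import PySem

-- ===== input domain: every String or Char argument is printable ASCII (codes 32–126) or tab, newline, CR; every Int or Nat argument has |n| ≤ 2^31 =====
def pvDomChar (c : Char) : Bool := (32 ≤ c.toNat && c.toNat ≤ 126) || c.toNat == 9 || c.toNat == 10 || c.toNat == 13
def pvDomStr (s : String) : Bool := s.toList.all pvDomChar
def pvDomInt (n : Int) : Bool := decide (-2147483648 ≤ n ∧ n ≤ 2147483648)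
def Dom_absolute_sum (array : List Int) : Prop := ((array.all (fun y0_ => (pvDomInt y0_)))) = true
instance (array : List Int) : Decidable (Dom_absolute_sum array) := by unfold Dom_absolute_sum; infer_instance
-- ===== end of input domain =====

-- B replaces A's flag-carrying loop by arithmetic: find the first negative's index, then abs-sum of the whole list minus abs-sum of the prefix through that index; objective: alternative.

-- ===== PORT A =====
-- literal port of A's loop: state is (summ, flag)
def absolute_sum (array : List Int) : Int :=
  (array.foldl
    (fun (st : Int × Bool) item =>
      if st.2 = true then (st.1 + |item|, st.2)
      else if item < 0 then (st.1, true) else st)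
    (0, false)).1

-- ===== PORT B =====
-- port of Source B: comprehension of indices of negatives; if none return 0; else total abs-sum minus abs-sum of arr[:i+1]
def absolute_sum_alt (array : List Int) : Int :=
  let negatives := ((PySem.List.enumerate array).filter (fun p => decide (p.2 < 0))).map (fun p => p.1)
  match negatives with
  | [] => 0
  | i :: _ =>
      (array.map (fun x => |x|)).sum
        - ((PySem.List.slice array none (some (i + 1))).map (fun x => |x|)).sum

-- ===== PRECONDITION & SPEC =====
def Spec_absolute_sum (array : List Int) (out : Int) : Prop := out = absolute_sum_alt array
instance (array : List Int) (out : Int) : Decidable (Spec_absolute_sum array out) := by unfold Spec_absolute_sum; infer_instance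

-- ===== CLAIM (what is proved, stated in full; the proofs are below) =====
def Claim_equal_absolute_sum : Prop := ∀ (array : List Int), Dom_absolute_sum array → Spec_absolute_sum array (absolute_sum array)

-- ===== LEMMAS AND PROOFS =====
-- proof-only helper: the (Nat) indices of the negative elements of a list
def natNegs : List Int → List Nat
  | [] => []
  | x :: xs => if x < 0 then 0 :: (natNegs xs).map (· + 1) else (natNegs xs).map (· + 1)

-- B's enumerate-based index list is natNegs shifted by the start
theorem negs_enumerate (l : List Int) (s : Int) :
    ((PySem.List.enumerate l s).filter (fun p => decide (p.2 < 0))).map (fun p => p.1)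
      = (natNegs l).map (fun (k : Nat) => ((k : Int) + s)) := by
  induction l generalizing s with
  | nil => simp [PySem.List.enumerate_nil, natNegs]
  | cons x xs ih =>
    by_cases hx : x < 0 <;>
      simp [PySem.List.enumerate_cons, natNegs, hx, ih (s + 1), List.map_map] <;>
      exact fun a _ => by omega

-- once the flag is set, A's loop just adds |item| each step
theorem absSum_foldl_true (l : List Int) (s : Int) :
    (l.foldl
      (fun (st : Int × Bool) item =>
        if st.2 = true then (st.1 + |item|, st.2)
        else if item < 0 then (st.1, true) else st)
      (s, true)).1 = s + (l.map (fun x => |x|)).sum := by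
  induction l generalizing s with
  | nil => simp
  | cons x xs ih => simp [List.foldl, ih (s + |x|)]; ring

-- A's loop computes B's subtraction formula, phrased with natNegs and take
theorem absolute_sum_natNegs (l : List Int) :
    absolute_sum l = (match natNegs l with
      | [] => 0
      | k :: _ => (l.map (fun x => |x|)).sum - ((l.take (k + 1)).map (fun x => |x|)).sum) := by
  induction l with
  | nil => rfl
  | cons x xs ih =>
    by_cases hx : x < 0
    · simp [absolute_sum, natNegs, hx, List.foldl, absSum_foldl_true xs 0]
    · have hA : absolute_sum (x :: xs) = absolute_sum xs := by
        simp [absolute_sum, List.foldl, hx]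
      rw [hA, ih]
      rcases h : natNegs xs with _ | ⟨k, r⟩
      · simp [natNegs, hx, h]
      · simp [natNegs, hx, h, List.take_succ_cons]

theorem absolute_sum_eq_alt (array : List Int) : absolute_sum array = absolute_sum_alt array := by
  rw [absolute_sum_natNegs]
  unfold absolute_sum_alt
  rw [negs_enumerate array 0]
  rcases h : natNegs array with _ | ⟨k, r⟩
  · simp
  · have hb : ((k : Int) + 0) + 1 = ((k + 1 : Nat) : Int) := by push_cast; ring
    simp only [List.map_cons, hb, PySem.List.slice_to_natCast]

-- ===== VERDICT (by name: the statement is the Claim_ definition above) =====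
theorem absolute_sum_spec : Claim_equal_absolute_sum := by
  intro array _
  exact absolute_sum_eq_alt array
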